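-- pv_equiv track=rewrite | github.com/tkdwns414/Algo | 프로그래머스/2/42860. 조이스틱/조이스틱.py | solution
-- ===== SOURCE A (Python) =====
-- def solution(name):
--     answer = 0
--
--     for alpha in name:
--         answer += min(ord(alpha) - ord('A'), ord('Z') - ord(alpha) + 1)
--         # 알파벳 변환에 사용되는 횟수
--
--     move = len(name) - 1 # 쭉 한 방향으로 갔을 때만 걸리는 횟수
--
--     for i in range(len(name)):
--         temp = i + 1
--         while temp < len(name) and name[temp] == 'A':
--             temp += 1 # 다음 바꿔야 할 알파벳 위치
--
--         dist = i + len(name) - temp + min(i, len(name) - temp)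
--         # i 는 오른쪽으로 이동했을 때 횟수
--         # len(name) - temp는 처음에 왼쪽으로 이동했을 때 횟수
--         # min(i, len(name) - temp)는 처음에 두 방향 중 어디로 간게 더 적게 이동했는지 찾기 위함
--         move = min(move, dist)
--
--     answer += move
--
--     return answer
-- ===== SOURCE B (Python) =====
-- def solution(name):
--     # Single backward pass: walking the name right-to-left we maintain, for the
--     # suffix already seen, (skip = length of its leading run of 'A's,
--     # best = cheapest horizontal move among starting points in that suffix,
--     # ans = letter-turning cost of the suffix), so A's inner forward rescan
--     # for the next non-'A' disappears.
--     n = len(name)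
--     skip, best, ans = 0, n - 1, 0
--     for i in range(n - 1, -1, -1):
--         c = name[i]
--         temp = i + 1 + skip
--         best = min(best, i + n - temp + min(i, n - temp))
--         skip = skip + 1 if c == 'A' else 0
--         ans = ans + min(ord(c) - 65, 91 - ord(c))
--     return ans + best
-- ===== Notes on version B (the rewrite author's own statement) =====
-- stated objective: alternative
-- what changed: A makes a forward pass over all positions with an inner while-rescan for the next letter that still needs changing, plus a separate pass summing letter costs; B is one backward pass keeping a (leading-'A'-run length, best move, letter cost) triple accumulator, so the inner scan and the second pass disappear.
import Mathlib
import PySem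

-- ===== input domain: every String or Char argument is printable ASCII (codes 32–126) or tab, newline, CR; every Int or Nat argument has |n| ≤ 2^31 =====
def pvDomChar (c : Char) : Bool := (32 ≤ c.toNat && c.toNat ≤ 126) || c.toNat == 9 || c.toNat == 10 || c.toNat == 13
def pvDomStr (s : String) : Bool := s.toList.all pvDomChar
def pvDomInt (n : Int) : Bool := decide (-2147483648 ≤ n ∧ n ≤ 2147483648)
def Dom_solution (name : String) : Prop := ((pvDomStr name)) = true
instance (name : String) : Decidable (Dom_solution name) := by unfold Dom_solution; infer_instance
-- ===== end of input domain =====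

-- B replaces A's forward pass with an inner while-rescan (plus a separate letter-cost
-- pass) by one backward pass maintaining (leading-'A'-run length, best move, letter cost).

-- ===== PORT A =====
-- the inner while loop of A (advance temp while the letter there is 'A')
def solution_whileA (s : List Char) (n temp : Int) : Int :=
  if h : temp < n ∧ PySem.List.pyGet? s temp = some 'A' then
    solution_whileA s n (temp + 1)
  else temp
termination_by (n - temp).toNat
decreasing_by omega

def solution (name : String) : Int :=
  let s := name.toList
  let n : Int := s.length
  let answer : Int :=
    s.foldl (fun acc alpha =>
      acc + min ((alpha.toNat : Int) - 65) (90 - (alpha.toNat : Int) + 1)) 0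
  let move :=
    (PySem.List.pyRange 0 n 1).foldl (fun move i =>
      let temp := solution_whileA s n (i + 1)
      min move (i + n - temp + min i (n - temp))) (n - 1)
  answer + move

-- ===== PORT B =====
-- B's backward loop, as structural recursion on the suffix starting at index i
-- (the recursive call processes the indices to the right first, exactly the
-- order of Source B's loop `for i in range(n-1, -1, -1)`); state = (skip, best, ans).
def solution_altGo (n : Int) : List Char → Int → Int × Int × Int
  | [], _ => (0, n - 1, 0)
  | c :: rest, i =>
    let (skip, best, ans) := solution_altGo n rest (i + 1)
    let temp := i + 1 + skip
    let best' := min best (i + n - temp + min i (n - temp))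
    let skip' := if c = 'A' then skip + 1 else 0
    let ans' := ans + min ((c.toNat : Int) - 65) (91 - (c.toNat : Int))
    (skip', best', ans')

def solution_alt (name : String) : Int :=
  let s := name.toList
  let r := solution_altGo (s.length : Int) s 0
  r.2.2 + r.2.1

-- ===== PRECONDITION & SPEC =====
def Spec_solution (name : String) (out : Int) : Prop := out = solution_alt name
instance (name : String) (out : Int) : Decidable (Spec_solution name out) := by unfold Spec_solution; infer_instance

-- ===== CLAIM =====
def Claim_equal_solution : Prop := ∀ (name : String), Dom_solution name → Spec_solution name (solution name)

-- ===== LEMMAS AND PROOFS =====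

-- length of the leading run of 'A's
def pvSkipA : List Char → Int
  | [] => 0
  | c :: r => if c = 'A' then pvSkipA r + 1 else 0

-- letter-turning cost of a suffix (B's summation order)
def pvAns : List Char → Int
  | [] => 0
  | c :: r => pvAns r + min ((c.toNat : Int) - 65) (91 - (c.toNat : Int))

-- horizontal-move candidate of A at absolute index j in the full string
def pvCand (full : List Char) (j : Nat) : Int :=
  let n : Int := full.length
  let t : Int := (j : Int) + 1 + pvSkipA (full.drop (j + 1))
  (j : Int) + n - t + min (j : Int) (n - t)

lemma pvAns_foldl (s : List Char) : ∀ (a : Int),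
    s.foldl (fun acc c => acc + min ((c.toNat : Int) - 65) (90 - (c.toNat : Int) + 1)) a
      = a + pvAns s := by
  induction s with
  | nil => intro a; simp [pvAns]
  | cons c r ih =>
    intro a
    simp only [List.foldl_cons, ih, pvAns]
    have : (90 : Int) - (c.toNat : Int) + 1 = 91 - (c.toNat : Int) := by ring
    rw [this]; ring

lemma solution_whileA_eq (s : List Char) : ∀ (fuel t : Nat), s.length - t ≤ fuel → t ≤ s.length →
    solution_whileA s s.length t = (t : Int) + pvSkipA (s.drop t) := by
  intro fuel
  induction fuel with
  | zero =>
    intro t hf ht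
    have ht' : t = s.length := by omega
    rw [solution_whileA]
    have : ¬ ((t : Int) < (s.length : Int) ∧ PySem.List.pyGet? s (t : Int) = some 'A') := by
      rintro ⟨h1, _⟩; omega
    rw [dif_neg this]
    subst ht'
    simp [pvSkipA]
  | succ k ih =>
    intro t hf ht
    rcases Nat.lt_or_ge t s.length with hlt | hge
    · rw [solution_whileA]
      have hget : PySem.List.pyGet? s (t : Int) = some s[t] := by
        simp [PySem.List.pyGet?_natCast, List.getElem?_eq_getElem hlt]
      have hdrop : s.drop t = s[t] :: s.drop (t + 1) := List.drop_eq_getElem_cons hlt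
      by_cases hA : s[t] = 'A'
      · have hcond : ((t : Int) < (s.length : Int) ∧ PySem.List.pyGet? s (t : Int) = some 'A') := by
          exact ⟨by exact_mod_cast hlt, by rw [hget, hA]⟩
        rw [dif_pos hcond]
        have hI := ih (t + 1) (by omega) (by omega)
        push_cast at hI
        rw [hI, hdrop]
        simp [pvSkipA, hA]
        omega
      · have hcond : ¬ ((t : Int) < (s.length : Int) ∧ PySem.List.pyGet? s (t : Int) = some 'A') := by
          rintro ⟨_, h2⟩
          rw [hget] at h2
          exact hA (Option.some.inj h2)
        rw [dif_neg hcond, hdrop]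
        simp [pvSkipA, hA]
    · have ht' : t = s.length := by omega
      rw [solution_whileA]
      have : ¬ ((t : Int) < (s.length : Int) ∧ PySem.List.pyGet? s (t : Int) = some 'A') := by
        rintro ⟨h1, _⟩; omega
      rw [dif_neg this]
      subst ht'
      simp [pvSkipA]

-- a min-accumulating foldl equals the corresponding foldr (min is comm/assoc)
lemma foldr_min_shift (f : Nat → Int) (l : List Nat) : ∀ (a b : Int),
    l.foldr (fun x m => min m (f x)) (min a b) = min (l.foldr (fun x m => min m (f x)) a) b := by
  induction l with
  | nil => intro a b; simp
  | cons x r ih => intro a b; simp only [List.foldr_cons, ih]; omega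

lemma foldl_min_eq_foldr (f : Nat → Int) (l : List Nat) : ∀ (a : Int),
    l.foldl (fun m x => min m (f x)) a = l.foldr (fun x m => min m (f x)) a := by
  induction l with
  | nil => intro a; simp
  | cons x r ih =>
    intro a
    simp only [List.foldl_cons, List.foldr_cons, ih]
    exact foldr_min_shift f r a (f x)

-- B's recursion computes (skip, best, ans) of the suffix, with best as a foldr of pvCand
lemma solution_altGo_eq (full : List Char) : ∀ (k i : Nat), i + k = full.length →
    solution_altGo (full.length : Int) (full.drop i) (i : Int) =
      (pvSkipA (full.drop i),
       (List.range' i k).foldr (fun j m => min m (pvCand full j)) ((full.length : Int) - 1),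
       pvAns (full.drop i)) := by
  intro k
  induction k with
  | zero =>
    intro i hi
    have : full.drop i = [] := List.drop_eq_nil_of_le (by omega)
    simp [this, solution_altGo, pvSkipA, pvAns, List.range']
  | succ m ih =>
    intro i hi
    have hlt : i < full.length := by omega
    have hdrop : full.drop i = full[i] :: full.drop (i + 1) := List.drop_eq_getElem_cons hlt
    have hI := ih (i + 1) (by omega)
    push_cast at hI
    rw [hdrop, solution_altGo, hI]
    have hr : List.range' i (m + 1) = i :: List.range' (i + 1) m := by rw [List.range'_succ]
    rw [hr, List.foldr_cons]
    refine Prod.ext ?_ (Prod.ext ?_ ?_)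
    · simp only [pvSkipA]
    · simp only [pvCand]
    · simp only [pvAns]

-- A's move-fold equals the same foldr of pvCand
lemma solution_move_eq (s : List Char) :
    (PySem.List.pyRange 0 (s.length : Int) 1).foldl (fun move i =>
        let temp := solution_whileA s (s.length : Int) (i + 1)
        min move (i + (s.length : Int) - temp + min i ((s.length : Int) - temp))) ((s.length : Int) - 1)
      = (List.range' 0 s.length).foldr (fun j m => min m (pvCand s j)) ((s.length : Int) - 1) := by
  have hstep : ∀ (move : Int), ∀ i ∈ PySem.List.pyRange 0 (s.length : Int) 1,
      (let temp := solution_whileA s (s.length : Int) (i + 1)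
       min move (i + (s.length : Int) - temp + min i ((s.length : Int) - temp)))
      = min move (pvCand s i.toNat) := by
    intro move i hi
    rw [PySem.List.mem_pyRange_one] at hi
    obtain ⟨k, rfl⟩ : ∃ k : Nat, i = (k : Int) := ⟨i.toNat, (Int.toNat_of_nonneg hi.1).symm⟩
    have hk : k < s.length := by exact_mod_cast hi.2
    have h1 : ((k : Int) + 1) = ((k + 1 : Nat) : Int) := by push_cast; ring
    rw [h1, solution_whileA_eq s (s.length - (k + 1)) (k + 1) (by omega) (by omega)]
    simp only [pvCand, Int.toNat_natCast]
    push_cast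
    ring_nf
  rw [PySem.List.foldl_congr_mem _ _ _ _ hstep]
  rw [PySem.List.pyRange_one]
  simp only [Int.sub_zero, Int.toNat_natCast]
  rw [List.foldl_map]
  have hfun : (fun (x : Int) (y : Nat) => min x (pvCand s ((0 + (y : Int)).toNat)))
      = (fun (x : Int) (y : Nat) => min x (pvCand s y)) := by
    funext x y; simp
  rw [hfun, foldl_min_eq_foldr, List.range_eq_range']

-- ===== VERDICT =====
theorem solution_spec : Claim_equal_solution := by
  intro name _
  unfold Spec_solution solution solution_alt
  simp only []
  have hB := solution_altGo_eq name.toList name.toList.length 0 (by omega)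
  simp only [List.drop_zero, Nat.cast_zero] at hB
  rw [hB]
  simp only []
  rw [pvAns_foldl, solution_move_eq]
  ring
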